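-- pv_equiv track=rewrite | github.com/pawlowiczf/ASD-2022-2023 | Programowanie dynamiczne 2022,2023/BIT ALGO/Schody_Amazona.py | count_jumps_bu
-- ===== SOURCE A (Python) =====
-- def count_jumps_bu(A):
--     n = len(A)
--     counts = [0] * n
--     counts[0] = 1
--
--     for i in range(n - 1):
--         for j in range(i + 1, min(i + 1 + A[i], n)):
--             counts[j] += counts[i]
--
--     return counts[n - 1]
-- ===== SOURCE B (Python) =====
-- def count_jumps_bu(A):
--     # Difference-array / prefix-sum formulation: each stair i broadcasts its
--     # path count to the range (i, min(i+1+A[i], n)) as two point updates.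
--     n = len(A)
--     d = [0] * (n + 2)
--     d[0] += 1
--     d[1] -= 1
--     cur = 0
--     for i in range(n):
--         cur += d[i]
--         e = min(i + 1 + A[i], n)
--         if i + 1 < e:
--             d[i + 1] += cur
--             d[e] -= cur
--     return cur
-- ===== Notes on version B (the rewrite author's own statement) =====
-- stated objective: faster
-- what changed: Replaced the nested range-update loop (adding counts[i] to every reachable index) by a difference array with a running prefix sum: each stair makes two point updates and the path counts are recovered while sweeping once.
import Mathlib
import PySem

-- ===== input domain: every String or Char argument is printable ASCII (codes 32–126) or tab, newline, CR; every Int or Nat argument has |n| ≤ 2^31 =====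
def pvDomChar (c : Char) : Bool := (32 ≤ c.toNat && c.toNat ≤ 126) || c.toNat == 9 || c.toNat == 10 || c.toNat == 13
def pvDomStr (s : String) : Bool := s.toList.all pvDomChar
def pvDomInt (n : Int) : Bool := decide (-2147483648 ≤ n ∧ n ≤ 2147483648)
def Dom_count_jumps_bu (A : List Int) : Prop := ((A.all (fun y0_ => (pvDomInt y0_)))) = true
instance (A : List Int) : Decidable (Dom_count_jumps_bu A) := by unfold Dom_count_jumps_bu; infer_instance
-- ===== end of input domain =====

-- B replaces A's quadratic inner range-update loop by a difference array with a running
-- prefix sum (two point updates per stair), an O(n) algorithm for the same path count.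

-- ===== PORT A =====
def stepInnerA (i : Nat) (c : List Int) (j : Int) : List Int :=
  c.set j.natAbs (c.getD j.natAbs 0 + c.getD i 0)

def stepOuterA (A : List Int) (counts : List Int) (i : Nat) : List Int :=
  (PySem.List.pyRange ((i:Int)+1) (min ((i:Int)+1 + A.getD i 0) (A.length:Int)) 1).foldl
    (stepInnerA i) counts

def count_jumps_bu (A : List Int) : Int :=
  let n := A.length
  let counts := (List.replicate n (0:Int)).set 0 1
  ((List.range (n-1)).foldl (stepOuterA A) counts).getD (n-1) 0

-- ===== PORT B =====
def stepB (A : List Int) (s : List Int × Int) (i : Nat) : List Int × Int :=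
  let cur := s.2 + s.1.getD i 0
  let e : Int := min ((i:Int)+1 + A.getD i 0) (A.length:Int)
  if (i:Int)+1 < e then
    let d1 := s.1.set (i+1) (s.1.getD (i+1) 0 + cur)
    (d1.set e.natAbs (d1.getD e.natAbs 0 - cur), cur)
  else (s.1, cur)

def count_jumps_bu_alt (A : List Int) : Int :=
  let n := A.length
  let d := ((List.replicate (n+2) (0:Int)).set 0 1).set 1 (-1)
  ((List.range n).foldl (stepB A) (d, 0)).2

-- ===== PRECONDITION & SPEC =====
-- Pre_ excludes only the empty list, on which Python A raises IndexError (counts[0] = 1).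
def Pre_count_jumps_bu (A : List Int) : Prop := A ≠ []
instance (A : List Int) : Decidable (Pre_count_jumps_bu A) := by unfold Pre_count_jumps_bu; infer_instance

def pvWitness_count_jumps_bu : List Int := [2, 1, 1]

def Spec_count_jumps_bu (A : List Int) (out : Int) : Prop := out = count_jumps_bu_alt A
instance (A : List Int) (out : Int) : Decidable (Spec_count_jumps_bu A out) := by unfold Spec_count_jumps_bu; infer_instance

-- ===== CLAIM (what is proved, stated in full; the proofs are below) =====
def Claim_equal_count_jumps_bu : Prop :=
  ∀ (A : List Int), Dom_count_jumps_bu A → Pre_count_jumps_bu A →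
    Spec_count_jumps_bu A (count_jumps_bu A)

-- ===== LEMMAS AND PROOFS =====

-- prefix sum of the first k entries of a difference array
def psum (d : List Int) (k : Nat) : Int := ((List.range k).map (fun t => d.getD t 0)).sum

lemma psum_succ (d : List Int) (k : Nat) : psum d (k+1) = psum d k + d.getD k 0 := by
  simp [psum, List.range_succ]

lemma getD_set (d : List Int) (t s : Nat) (v : Int) (ht : t < d.length) :
    (d.set t v).getD s 0 = if s = t then v else d.getD s 0 := by
  simp only [List.getD_eq_getElem?_getD, List.getElem?_set]
  rcases eq_or_ne s t with rfl | hne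
  · simp [ht]
  · rw [if_neg (Ne.symm hne), if_neg hne]

lemma psum_set (d : List Int) (t k : Nat) (v : Int) (ht : t < d.length) :
    psum (d.set t v) k = psum d k + (if t < k then v - d.getD t 0 else 0) := by
  induction k with
  | zero => simp [psum]
  | succ k ih =>
    rw [psum_succ, psum_succ, ih, getD_set d t k v ht]
    rcases Nat.lt_trichotomy t k with h | h | h
    · rw [if_pos h, if_neg (by omega), if_pos (by omega)]; ring
    · subst h; rw [if_neg (by omega), if_pos rfl, if_pos (by omega)]; ring
    · rw [if_neg (by omega), if_neg (by omega), if_neg (by omega)]; ring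

-- effect of A's inner loop on each entry
lemma innerA_spec (L : List Int) (cs : List Int) (i : Nat)
    (hL : ∀ j ∈ L, (i:Int) < j ∧ j < (cs.length:Int)) :
    (L.foldl (stepInnerA i) cs).length = cs.length ∧
    ∀ k : Nat, (L.foldl (stepInnerA i) cs).getD k 0
      = cs.getD k 0 + cs.getD i 0 * (L.count (k:Int)) := by
  induction L generalizing cs with
  | nil => simp
  | cons j L ih =>
    obtain ⟨hij, hjlen⟩ := hL j (List.mem_cons_self ..)
    have hj0 : 0 ≤ j := by omega
    have hjn : j.natAbs < cs.length := by omega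
    have hjabs : (j.natAbs : Int) = j := Int.natAbs_of_nonneg hj0
    have hji : j.natAbs ≠ i := by omega
    set cs' := stepInnerA i cs j with hcs'
    have hlen' : cs'.length = cs.length := by simp [hcs', stepInnerA]
    have hL' : ∀ x ∈ L, (i:Int) < x ∧ x < (cs'.length:Int) := by
      intro x hx; rw [hlen']; exact hL x (List.mem_cons_of_mem _ hx)
    obtain ⟨ih1, ih2⟩ := ih cs' hL'
    have hgi : cs'.getD i 0 = cs.getD i 0 := by
      rw [hcs', stepInnerA, getD_set _ _ _ _ hjn, if_neg (by omega)]
    refine ⟨by rw [List.foldl_cons, ← hcs', ih1, hlen'], ?_⟩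
    intro k
    rw [List.foldl_cons, ← hcs', ih2 k, hgi]
    have hgk : cs'.getD k 0
        = cs.getD k 0 + (if k = j.natAbs then cs.getD i 0 else 0) := by
      rw [hcs', stepInnerA, getD_set _ _ _ _ hjn]
      split_ifs with h
      · subst h; ring
      · ring
    rw [hgk, List.count_cons]
    simp only [beq_iff_eq]
    by_cases h : k = j.natAbs
    · rw [if_pos h, if_pos (show j = (k:Int) by omega)]
      push_cast; ring
    · rw [if_neg h, if_neg (show ¬ j = (k:Int) by omega)]
      push_cast; ring

lemma stepB_snd (A : List Int) (s : List Int × Int) (i : Nat) :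
    (stepB A s i).2 = s.2 + s.1.getD i 0 := by
  rw [stepB]; split_ifs <;> rfl

-- the initial states
lemma counts0_getD (n k : Nat) (hn : 1 ≤ n) :
    ((List.replicate n (0:Int)).set 0 1).getD k 0 = if k = 0 then 1 else 0 := by
  rw [getD_set _ _ _ _ (by simpa using hn)]
  split_ifs with h
  · rfl
  · rcases Nat.lt_or_ge k n with h2 | h2 <;>
      simp [List.getD_eq_getElem?_getD, h2]

lemma d0_getD (n t : Nat) :
    (((List.replicate (n+2) (0:Int)).set 0 1).set 1 (-1)).getD t 0
      = if t = 0 then 1 else if t = 1 then -1 else 0 := by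
  rw [getD_set _ _ _ _ (by simp), getD_set _ _ _ _ (by simp)]
  rcases t with _ | _ | t
  · simp
  · simp
  · rw [if_neg (by omega), if_neg (by omega), if_neg (by omega), if_neg (by omega),
        List.getD_eq_getElem?_getD, List.getElem?_replicate]
    split <;> rfl

lemma psum_d0 (n m : Nat) :
    psum (((List.replicate (n+2) (0:Int)).set 0 1).set 1 (-1)) m
      = if m = 0 then 0 else if m = 1 then 1 else 0 := by
  induction m with
  | zero => simp [psum]
  | succ m ih =>
    rw [psum_succ, ih, d0_getD]
    rcases m with _ | _ | m <;> simp

-- the joint loop invariant: A's counts array is the prefix-sum reconstruction of B's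
-- difference array, and B's running value is the prefix sum below the loop index
lemma loop_inv (A : List Int) (hA : 1 ≤ A.length) (i : Nat) (hi : i ≤ A.length - 1) :
    ((List.range i).foldl (stepOuterA A) ((List.replicate A.length (0:Int)).set 0 1)).length = A.length ∧
    ((List.range i).foldl (stepB A) (((List.replicate (A.length+2) (0:Int)).set 0 1).set 1 (-1), 0)).1.length = A.length + 2 ∧
    ((List.range i).foldl (stepB A) (((List.replicate (A.length+2) (0:Int)).set 0 1).set 1 (-1), 0)).2
      = psum ((List.range i).foldl (stepB A) (((List.replicate (A.length+2) (0:Int)).set 0 1).set 1 (-1), 0)).1 i ∧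
    ∀ k, k < A.length →
      ((List.range i).foldl (stepOuterA A) ((List.replicate A.length (0:Int)).set 0 1)).getD k 0
        = psum ((List.range i).foldl (stepB A) (((List.replicate (A.length+2) (0:Int)).set 0 1).set 1 (-1), 0)).1 (k+1) := by
  induction i with
  | zero =>
    refine ⟨by simp, by simp, by simp [psum], ?_⟩
    intro k hk
    simp only [List.range_zero, List.foldl_nil]
    rw [counts0_getD _ _ hA, psum_d0]
    rcases k with _ | k <;> simp
  | succ i ih =>
    obtain ⟨h1, h2, h3, h4⟩ := ih (by omega)
    set CA := (List.range i).foldl (stepOuterA A) ((List.replicate A.length (0:Int)).set 0 1) with hCA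
    set SB := (List.range i).foldl (stepB A) (((List.replicate (A.length+2) (0:Int)).set 0 1).set 1 (-1), 0) with hSB
    rw [List.range_succ, List.foldl_append, List.foldl_append, List.foldl_cons, List.foldl_cons,
        List.foldl_nil, List.foldl_nil, ← hCA, ← hSB]
    set n := A.length with hn
    set e : Int := min ((i:Int)+1 + A.getD i 0) (n:Int) with he
    have hen : e ≤ (n:Int) := min_le_right _ _
    set cur : Int := SB.2 + SB.1.getD i 0 with hcur
    have hcur' : cur = psum SB.1 (i+1) := by rw [hcur, h3, psum_succ]
    have hCAi : CA.getD i 0 = cur := by rw [h4 i (by omega), hcur']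
    have hLspec : ∀ j ∈ PySem.List.pyRange ((i:Int)+1) e 1, (i:Int) < j ∧ j < (CA.length:Int) := by
      intro j hj
      rw [PySem.List.mem_pyRange_one] at hj
      rw [h1]
      omega
    obtain ⟨hi1, hi2⟩ := innerA_spec _ CA i hLspec
    have hcount : ∀ k : Nat, (PySem.List.pyRange ((i:Int)+1) e 1).count (k:Int)
        = if (i:Int)+1 ≤ (k:Int) ∧ (k:Int) < e then 1 else 0 := by
      intro k
      split_ifs with h
      · exact List.count_eq_one_of_mem (PySem.List.nodup_pyRange_one _ _)
          (PySem.List.mem_pyRange_one.mpr h)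
      · exact List.count_eq_zero.mpr (fun hm => h (PySem.List.mem_pyRange_one.mp hm))
    have hCAstep : ∀ k : Nat, (stepOuterA A CA i).getD k 0
        = CA.getD k 0 + cur * (if (i:Int)+1 ≤ (k:Int) ∧ (k:Int) < e then 1 else 0) := by
      intro k
      rw [stepOuterA, ← hn, ← he, hi2 k, hcount k, hCAi]
      split_ifs <;> push_cast <;> ring
    have hCAlen : (stepOuterA A CA i).length = n := by rw [stepOuterA, ← hn, ← he, hi1, h1]
    by_cases hb : (i:Int)+1 < e
    · -- B performs the two point updates
      have he0 : 0 ≤ e := by omega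
      have hena : (e.natAbs : Int) = e := Int.natAbs_of_nonneg he0
      have hena2 : i + 1 < e.natAbs := by omega
      have hsb : stepB A SB i
          = ((SB.1.set (i+1) (SB.1.getD (i+1) 0 + cur)).set e.natAbs
              ((SB.1.set (i+1) (SB.1.getD (i+1) 0 + cur)).getD e.natAbs 0 - cur), cur) := by
        rw [stepB, ← hn, ← he, ← hcur, if_pos hb]
      have hlen1 : (SB.1.set (i+1) (SB.1.getD (i+1) 0 + cur)).length = n + 2 := by simp [h2]
      have hps : ∀ m : Nat, psum (stepB A SB i).1 m
          = psum SB.1 m + (if i+1 < m then cur else 0) + (if e.natAbs < m then -cur else 0) := by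
        intro m
        rw [hsb]
        simp only
        rw [psum_set _ _ _ _ (by rw [hlen1]; omega),
            psum_set _ _ _ _ (by rw [h2]; omega)]
        split_ifs <;> ring
      refine ⟨hCAlen, by rw [hsb]; simp [h2], ?_, ?_⟩
      · rw [hps (i+1), if_neg (by omega), if_neg (by omega), hsb]
        simpa using hcur'
      · intro k hk
        rw [hCAstep k, hps (k+1), h4 k hk]
        split_ifs
        all_goals (try (exfalso; omega))
        all_goals ring
    · -- range empty on both sides: only cur advances
      have hnil : PySem.List.pyRange ((i:Int)+1) e 1 = [] :=
        PySem.List.pyRange_one_eq_nil (by omega)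
      have hsb : stepB A SB i = (SB.1, cur) := by
        rw [stepB, ← hn, ← he, ← hcur, if_neg hb]
      have hca : stepOuterA A CA i = CA := by
        rw [stepOuterA, ← hn, ← he, hnil, List.foldl_nil]
      refine ⟨by rw [hca, h1], by rw [hsb]; exact h2, by rw [hsb, hcur'], ?_⟩
      intro k hk
      rw [hca, hsb, h4 k hk]

-- ===== VERDICT (by name: the statements are the Claim_ definitions above) =====
theorem count_jumps_bu_spec : Claim_equal_count_jumps_bu := by
  unfold Claim_equal_count_jumps_bu
  intro A _ hpre
  have hA : 1 ≤ A.length := by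
    rcases A with _ | ⟨a, A⟩
    · exact absurd rfl hpre
    · simp
  obtain ⟨h1, h2, h3, h4⟩ := loop_inv A hA (A.length - 1) le_rfl
  unfold Spec_count_jumps_bu count_jumps_bu count_jumps_bu_alt
  simp only
  have hrange : List.range A.length = List.range (A.length - 1) ++ [A.length - 1] := by
    have : A.length = (A.length - 1) + 1 := by omega
    rw [this, List.range_succ]
    simp
  rw [hrange, List.foldl_append, List.foldl_cons, List.foldl_nil, stepB_snd,
      h3, h4 (A.length - 1) (by omega), ← psum_succ]
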